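-- pv_equiv track=rewrite | github.com/AKranz-dev/LeetCode | Accepted/MaximumSumWithExactlyKElements.py | maximizeSum
-- ===== SOURCE A (Python) =====
-- def maximizeSum(nums: list[int], k: int) -> int:
--
--     res = 0
--     for i in range(k):
--         target = max(nums)
--         res+=target
--         nums.remove(target)
--         nums.append(target+1)
--     return res
-- ===== SOURCE B (Python) =====
-- def maximizeSum(nums: list[int], k: int) -> int:
--     # closed form: k picks starting at max(nums), increasing by 1 each time
--     if k <= 0:
--         return 0
--     m = max(nums)
--     return k * m + k * (k - 1) // 2
-- ===== Notes on version B (the rewrite author's own statement) =====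
-- stated objective: faster
-- what changed: Replaces the k-iteration loop that repeatedly scans, removes from and appends to the list with a single max() scan plus the closed-form arithmetic series k*m + k*(k-1)//2.
import Mathlib
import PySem

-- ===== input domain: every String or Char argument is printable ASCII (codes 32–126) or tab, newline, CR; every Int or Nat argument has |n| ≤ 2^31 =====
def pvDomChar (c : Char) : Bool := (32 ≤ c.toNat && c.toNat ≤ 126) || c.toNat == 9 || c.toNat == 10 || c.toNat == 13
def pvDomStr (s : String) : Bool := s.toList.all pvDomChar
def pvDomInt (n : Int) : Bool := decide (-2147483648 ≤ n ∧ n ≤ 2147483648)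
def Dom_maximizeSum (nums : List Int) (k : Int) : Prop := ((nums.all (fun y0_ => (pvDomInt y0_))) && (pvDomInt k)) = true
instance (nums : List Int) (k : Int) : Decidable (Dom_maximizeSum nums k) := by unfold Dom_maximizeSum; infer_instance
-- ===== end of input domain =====

-- B replaces A's k-iteration max/remove/append loop by one max scan plus the closed-form
-- arithmetic series k*m + k*(k-1)//2; A mutates its list argument, B does not — only the
-- RETURN value is claimed equal here.


-- ===== PORT A =====
-- one iteration of A's loop body: target = max(nums); res += target;
-- nums.remove(target); nums.append(target+1)
-- (the 'none' branch is Python's ValueError on max([]) — excluded by Pre_)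
def pvStepA (st : List Int × Int) : List Int × Int :=
  match PySem.List.max? st.1 (fun y => y) with
  | none => st
  | some t => ((PySem.List.remove? st.1 t).getD st.1 ++ [t + 1], st.2 + t)

def maximizeSum (nums : List Int) (k : Int) : Int :=
  ((PySem.List.pyRange 0 k 1).foldl (fun st _ => pvStepA st) (nums, 0)).2

-- ===== PORT B =====
def maximizeSum_alt (nums : List Int) (k : Int) : Int :=
  if k ≤ 0 then 0
  else
    match PySem.List.max? nums (fun y => y) with
    | none => 0   -- Python's max([]) raises here too; excluded by Pre_
    | some m => k * m + PySem.Int.floordiv (k * (k - 1)) 2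

-- ===== PRECONDITION & SPEC =====
-- Pre_ excludes only nums = [] with k > 0, where A (and B) raise ValueError on max([]).
def Pre_maximizeSum (nums : List Int) (k : Int) : Prop := nums ≠ [] ∨ k ≤ 0
instance (nums : List Int) (k : Int) : Decidable (Pre_maximizeSum nums k) := by
  unfold Pre_maximizeSum; infer_instance

def pvWitness_maximizeSum : List Int × Int := ([1, 3, 2], 4)

def Spec_maximizeSum (nums : List Int) (k : Int) (out : Int) : Prop := out = maximizeSum_alt nums k
instance (nums : List Int) (k : Int) (out : Int) : Decidable (Spec_maximizeSum nums k out) := by unfold Spec_maximizeSum; infer_instance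

-- ===== CLAIM (what is proved, stated in full; the proofs are below) =====
def Claim_equal_maximizeSum : Prop := ∀ (nums : List Int) (k : Int), Dom_maximizeSum nums k → Pre_maximizeSum nums k → Spec_maximizeSum nums k (maximizeSum nums k)

-- ===== LEMMAS AND PROOFS =====

-- a foldl whose function ignores the elements is an iterate of the step
theorem pv_foldl_const {α β : Type} (f : β → β) :
    ∀ (l : List α) (st : β), l.foldl (fun st _ => f st) st = f^[l.length] st := by
  intro l
  induction l with
  | nil => intro st; rfl
  | cons x t ih =>
      intro st
      simp [List.foldl, ih, Function.iterate_succ_apply]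

theorem pv_max?_id_eq_some {xs : List Int} {m : Int}
    (hm : m ∈ xs) (hmax : ∀ y ∈ xs, y ≤ m) :
    PySem.List.max? xs (fun y => y) = some m := by
  cases hx : PySem.List.max? xs (fun y => y) with
  | none =>
      rw [PySem.List.max?_eq_none_iff] at hx
      simp [hx] at hm
  | some m' =>
      have h1 := PySem.List.max?_mem hx
      have h2 := PySem.List.max?_isMax hx
      have := hmax m' h1
      have := h2 m hm
      simp only [Option.some_inj]
      omega

-- one step of A's loop: sum grows by t, max grows by 1
theorem pv_stepA_of_max {xs : List Int} {t r : Int}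
    (h : PySem.List.max? xs (fun y => y) = some t) :
    pvStepA (xs, r) = (xs.erase t ++ [t + 1], r + t) ∧
      PySem.List.max? (xs.erase t ++ [t + 1]) (fun y => y) = some (t + 1) := by
  have ht : t ∈ xs := PySem.List.max?_mem h
  have hmax := PySem.List.max?_isMax h
  constructor
  · have hr := PySem.List.remove?_eq_some_erase (xs := xs) (v := t) ht
    simp [pvStepA, h, hr]
  · apply pv_max?_id_eq_some
    · simp
    · intro y hy
      rcases List.mem_append.mp hy with hy | hy
      · have := hmax y (List.mem_of_mem_erase hy)
        omega
      · simp at hy; omega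

-- n iterations of A's loop from a list with max t add the sum Σ_{i<n} (t+i)
theorem pv_iterA (n : Nat) : ∀ (xs : List Int) (t r : Int),
    PySem.List.max? xs (fun y => y) = some t →
    ∃ ys, pvStepA^[n] (xs, r) = (ys, r + ∑ i ∈ Finset.range n, (t + (i : Int))) ∧
      PySem.List.max? ys (fun y => y) = some (t + n) := by
  induction n with
  | zero =>
      intro xs t r h
      exact ⟨xs, by simp, by simpa using h⟩
  | succ n ih =>
      intro xs t r h
      obtain ⟨ys, hys, hmax⟩ := ih xs t r h
      obtain ⟨hstep, hmax'⟩ := pv_stepA_of_max hmax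
      refine ⟨ys.erase (t + n) ++ [t + n + 1], ?_, ?_⟩
      · rw [Function.iterate_succ_apply', hys, hstep]
        rw [Finset.sum_range_succ]
        refine congrArg _ ?_
        push_cast
        ring
      · rw [hmax']
        refine congrArg _ ?_
        push_cast
        ring

theorem pv_gauss (n : Nat) :
    (n : Int) * ((n : Int) - 1) = 2 * ∑ i ∈ Finset.range n, (i : Int) := by
  induction n with
  | zero => simp
  | succ n ih =>
      rw [Finset.sum_range_succ]
      push_cast
      nlinarith [ih]

-- ===== VERDICT (by name: the statement is the Claim_ definition above) =====
theorem maximizeSum_spec : Claim_equal_maximizeSum := by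
  intro nums k _ hpre
  unfold Spec_maximizeSum maximizeSum maximizeSum_alt
  by_cases hk : k ≤ 0
  · rw [PySem.List.pyRange_one_eq_nil hk]
    simp [hk]
  · have hne : nums ≠ [] := by
      rcases hpre with h | h
      · exact h
      · omega
    rw [pv_foldl_const pvStepA, PySem.List.length_pyRange_one]
    cases hx : PySem.List.max? nums (fun y => y) with
    | none =>
        rw [PySem.List.max?_eq_none_iff] at hx
        exact absurd hx hne
    | some m =>
        obtain ⟨ys, hys, -⟩ := pv_iterA (k - 0).toNat nums m 0 hx
        rw [hys]
        simp only [if_neg hk]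
        have hn : ((k - 0).toNat : Int) = k := by omega
        have hg := pv_gauss (k - 0).toNat
        rw [hn] at hg
        rw [PySem.Int.floordiv_eq_ediv_of_pos (by omega : (0:Int) < 2), hg,
          Int.mul_ediv_cancel_left _ (by omega : (2:Int) ≠ 0)]
        rw [Finset.sum_add_distrib, Finset.sum_const, Finset.card_range, nsmul_eq_mul, hn]
        ring
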